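-- pv_equiv track=rewrite | github.com/KatekaniN/dydx-project-xray | integrations/mediamark/move_mediamark_card.py | resolve_phase_id_by_name
-- ===== SOURCE A (Python) =====
-- from typing import Optional, Dict, List
--
-- def resolve_phase_id_by_name(phases: List[Dict[str, str]], phase_name: str) -> Optional[str]:
--     target = phase_name.strip().lower()
--
--     # Exact match first
--     for phase in phases:
--         if (phase.get('name') or '').strip().lower() == target:
--             return phase.get('id')
--
--     # Then substring match (helpful for minor naming differences)
--     for phase in phases:
--         name = (phase.get('name') or '').strip().lower()
--         if target in name or name in target:
--             return phase.get('id')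
--
--     return None
-- ===== SOURCE B (Python) =====
-- def resolve_phase_id_by_name(phases, phase_name):
--     target = phase_name.strip().lower()
--     fallback = None
--     for phase in phases:
--         name = (phase.get('name') or '').strip().lower()
--         if name == target:
--             return phase.get('id')
--         if fallback is None and (target in name or name in target):
--             fallback = phase
--     return fallback.get('id') if fallback is not None else None
-- ===== Notes on version B (the rewrite author's own statement) =====
-- stated objective: alternative
-- what changed: Replaces A's two full scans (exact pass, then substring pass) by one single pass that returns early on an exact match and remembers only the first substring-matching phase as a deferred fallback.
import Mathlib
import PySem

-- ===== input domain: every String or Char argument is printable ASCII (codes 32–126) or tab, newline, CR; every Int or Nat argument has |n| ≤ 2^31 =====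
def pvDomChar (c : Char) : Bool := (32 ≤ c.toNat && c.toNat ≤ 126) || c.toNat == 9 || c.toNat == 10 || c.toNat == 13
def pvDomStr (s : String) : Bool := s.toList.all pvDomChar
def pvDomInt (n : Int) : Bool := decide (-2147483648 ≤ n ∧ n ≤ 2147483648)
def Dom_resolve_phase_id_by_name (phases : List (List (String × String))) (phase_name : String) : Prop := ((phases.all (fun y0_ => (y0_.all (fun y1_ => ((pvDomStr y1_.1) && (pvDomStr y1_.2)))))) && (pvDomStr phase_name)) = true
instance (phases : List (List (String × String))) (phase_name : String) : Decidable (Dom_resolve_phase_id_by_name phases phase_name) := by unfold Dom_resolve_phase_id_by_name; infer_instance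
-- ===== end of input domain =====

-- B does one pass with a remembered first-substring-hit fallback instead of A's two passes (different decomposition; return value proved equal).

-- shared helper: (phase.get('name') or '').strip().lower() — the same expression both Pythons compute
def pvNorm (p : List (String × String)) : String :=
  PySem.Str.lower (PySem.Str.strip (((PySem.Dict.mk p).get? "name").getD ""))

-- ===== PORT A =====
-- first loop: exact match; 'some v' means the Python function returned v
def pvALoop1 (target : String) : List (List (String × String)) → Option (Option String)
  | [] => none
  | p :: rest =>
    if pvNorm p == target then some ((PySem.Dict.mk p).get? "id") else pvALoop1 target rest

-- second loop: substring match
def pvALoop2 (target : String) : List (List (String × String)) → Option (Option String)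
  | [] => none
  | p :: rest =>
    let name := pvNorm p
    if PySem.Str.isIn target name || PySem.Str.isIn name target then some ((PySem.Dict.mk p).get? "id")
    else pvALoop2 target rest

def resolve_phase_id_by_name (phases : List (List (String × String))) (phase_name : String) : Option String :=
  let target := PySem.Str.lower (PySem.Str.strip phase_name)
  match pvALoop1 target phases with
  | some v => v
  | none =>
    match pvALoop2 target phases with
    | some v => v
    | none => none

-- ===== PORT B =====
-- single pass: early return on exact match, first substring hit remembered in 'fallback'
def pvBLoop (target : String) (fallback : Option (List (String × String))) : List (List (String × String)) → Option String
  | [] => match fallback with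
          | some p => (PySem.Dict.mk p).get? "id"
          | none => none
  | p :: rest =>
    let name := pvNorm p
    if name == target then (PySem.Dict.mk p).get? "id"
    else if fallback.isNone && (PySem.Str.isIn target name || PySem.Str.isIn name target) then
      pvBLoop target (some p) rest
    else pvBLoop target fallback rest

def resolve_phase_id_by_name_alt (phases : List (List (String × String))) (phase_name : String) : Option String :=
  let target := PySem.Str.lower (PySem.Str.strip phase_name)
  pvBLoop target none phases

-- ===== PRECONDITION & SPEC =====
def Spec_resolve_phase_id_by_name (phases : List (List (String × String))) (phase_name : String) (out : Option String) : Prop := out = resolve_phase_id_by_name_alt phases phase_name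
instance (phases : List (List (String × String))) (phase_name : String) (out : Option String) : Decidable (Spec_resolve_phase_id_by_name phases phase_name out) := by unfold Spec_resolve_phase_id_by_name; infer_instance

-- ===== CLAIM (what is proved, stated in full; the proofs are below) =====
def Claim_equal_resolve_phase_id_by_name : Prop := ∀ (phases : List (List (String × String))) (phase_name : String), Dom_resolve_phase_id_by_name phases phase_name → Spec_resolve_phase_id_by_name phases phase_name (resolve_phase_id_by_name phases phase_name)

-- ===== LEMMAS AND PROOFS =====
-- invariant of B's single loop: it equals A's exact pass, with the stored fallback
-- (or, failing that, A's substring pass) as the residual result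
theorem pvBLoop_eq (target : String) (phases : List (List (String × String))) :
    ∀ fb : Option (List (String × String)),
      pvBLoop target fb phases =
        match pvALoop1 target phases with
        | some v => v
        | none =>
          match fb with
          | some p => (PySem.Dict.mk p).get? "id"
          | none =>
            match pvALoop2 target phases with
            | some v => v
            | none => none := by
  induction phases with
  | nil =>
    intro fb
    cases fb <;> simp [pvBLoop, pvALoop1, pvALoop2]
  | cons p rest ih =>
    intro fb
    by_cases h1 : (pvNorm p == target) = true
    · simp [pvBLoop, pvALoop1, h1]
    · by_cases h2 : (PySem.Str.isIn target (pvNorm p) || PySem.Str.isIn (pvNorm p) target) = true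
      · cases fb with
        | none =>
          simp [pvBLoop, pvALoop1, pvALoop2, h1, ih]
          split_ifs <;> simp
        | some q => simp [pvBLoop, pvALoop1, h1, ih]
      · cases fb with
        | none =>
          simp [pvBLoop, pvALoop1, pvALoop2, h1, ih]
          split_ifs <;> simp
        | some q => simp [pvBLoop, pvALoop1, h1, ih]

-- ===== VERDICT (by name: the statement is the Claim_ definition above) =====
theorem resolve_phase_id_by_name_spec : Claim_equal_resolve_phase_id_by_name := by
  intro phases phase_name _
  unfold Spec_resolve_phase_id_by_name resolve_phase_id_by_name resolve_phase_id_by_name_alt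
  rw [pvBLoop_eq]
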